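-- pv_equiv track=rewrite | github.com/tenaibr/pycalc | calc.py | syntax_check
-- ===== SOURCE A (Python) =====
-- def syntax_check(string: str):
--     compt = 0
--     for i in range(len(string)):
--         if compt < 0:
--             return False
--         if string[i] == "(":
--             compt += 1
--         elif string[i] == ")":
--             compt -= 1
--     for i in range(len(string)-1):
--         if string[i] in ["+", "*", "-", "/"] and string[i+1] in ["+", "*", "-", "/"]:
--             return False
--     if string[0] in ["+", "*", "-", "/"] or string[-1] in ["+", "*", "-", "/"]:
--         return False
--     return compt == 0
-- ===== SOURCE B (Python) =====
-- def syntax_check(string: str):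
--     ops = ("+", "*", "-", "/")
--     if string[0] in ops or string[-1] in ops:
--         return False
--     bal = 0
--     prev = ""
--     for c in string:
--         if c == "(":
--             bal += 1
--         elif c == ")":
--             bal -= 1
--             if bal < 0:
--                 return False
--         elif c in ops and prev in ops:
--             return False
--         prev = c
--     return bal == 0
-- ===== Notes on version B (the rewrite author's own statement) =====
-- stated objective: simpler
-- what changed: B replaces A's three sequential passes (balance loop, adjacent-operator index loop, boundary check) with boundary checks up front followed by one linear pass that tracks the running balance and the previous character, exiting early on a negative balance or adjacent operators.
import Mathlib
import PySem

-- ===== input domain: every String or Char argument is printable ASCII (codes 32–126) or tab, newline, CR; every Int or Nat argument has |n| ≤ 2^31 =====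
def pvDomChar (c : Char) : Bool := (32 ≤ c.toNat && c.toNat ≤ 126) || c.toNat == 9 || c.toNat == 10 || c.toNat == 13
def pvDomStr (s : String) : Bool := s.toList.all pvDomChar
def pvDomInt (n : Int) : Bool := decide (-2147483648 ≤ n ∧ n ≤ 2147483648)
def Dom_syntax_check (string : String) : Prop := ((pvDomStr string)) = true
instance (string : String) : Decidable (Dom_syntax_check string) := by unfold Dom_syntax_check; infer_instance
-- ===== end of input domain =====

-- B fuses A's three passes into one boundary check plus one balance/previous-char pass (simpler; same O(n) cost).

-- ===== PORT A =====
-- helper: `c in ["+", "*", "-", "/"]`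
def pvIsOpA (c : Char) : Bool := c ∈ ['+', '*', '-', '/']

-- first loop: checks compt < 0 before each character, then updates compt; `none` = early `return False`
def pvLoop1A : List Char → Int → Option Int
  | [], compt => some compt
  | c :: rest, compt =>
    if compt < 0 then none
    else pvLoop1A rest (if c = '(' then compt + 1 else if c = ')' then compt - 1 else compt)

-- second loop over adjacent pairs: `true` = early `return False` fired
def pvLoop2A : List Char → Bool
  | a :: b :: rest => (pvIsOpA a && pvIsOpA b) || pvLoop2A (b :: rest)
  | _ => false

def syntax_check (string : String) : Bool :=
  let cs := string.toList
  match pvLoop1A cs 0 with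
  | none => false
  | some compt =>
    if pvLoop2A cs then false
    else
      match PySem.Str.pyGet? string 0, PySem.Str.pyGet? string (-1) with
      | some c0, some cl =>
        if pvIsOpA c0 || pvIsOpA cl then false else decide (compt = 0)
      | _, _ => false   -- string[0] / string[-1] raises IndexError on ""; excluded by Pre_

-- ===== PORT B =====
def pvIsOpB (c : Char) : Bool := c == '+' || c == '*' || c == '-' || c == '/'

-- `prev` starts as "" (no previous character) → Option Char; `prev in ops` is false for ""
def pvPrevOpB : Option Char → Bool
  | some p => pvIsOpB p
  | none => false

def pvLoopB : List Char → Int → Option Char → Bool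
  | [], bal, _ => decide (bal = 0)
  | c :: rest, bal, prev =>
    if c = '(' then pvLoopB rest (bal + 1) (some c)
    else if c = ')' then
      if bal - 1 < 0 then false else pvLoopB rest (bal - 1) (some c)
    else if pvIsOpB c && pvPrevOpB prev then false
    else pvLoopB rest bal (some c)

def syntax_check_alt (string : String) : Bool :=
  match PySem.Str.pyGet? string 0 with
  | none => false   -- string[0] raises IndexError on ""; excluded by Pre_
  | some c0 =>
    match PySem.Str.pyGet? string (-1) with
    | none => false
    | some cl =>
      if pvIsOpB c0 || pvIsOpB cl then false
      else pvLoopB string.toList 0 none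

-- ===== PRECONDITION & SPEC =====
-- A raises IndexError on the empty string (string[0]); excluded.
def Pre_syntax_check (string : String) : Prop := string ≠ ""
instance (string : String) : Decidable (Pre_syntax_check string) := by
  unfold Pre_syntax_check; infer_instance
def pvWitness_syntax_check : String := "(1+2)"

def Spec_syntax_check (string : String) (out : Bool) : Prop := out = syntax_check_alt string
instance (string : String) (out : Bool) : Decidable (Spec_syntax_check string out) := by unfold Spec_syntax_check; infer_instance

-- ===== CLAIM (what is proved, stated in full; the proofs are below) =====
def Claim_equal_syntax_check : Prop := ∀ (string : String), Dom_syntax_check string → Pre_syntax_check string → Spec_syntax_check string (syntax_check string)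

-- ===== LEMMAS AND PROOFS =====

theorem pvOp_AB (c : Char) : pvIsOpB c = pvIsOpA c := by
  rw [Bool.eq_iff_iff]
  simp only [pvIsOpB, pvIsOpA, List.mem_cons, List.not_mem_nil, or_false, Bool.or_eq_true,
    beq_iff_eq, decide_eq_true_eq]
  tauto

-- adjacency with an explicit previous character, matching B's traversal
def pvAdj : Option Char → List Char → Bool
  | _, [] => false
  | prev, c :: rest => (pvPrevOpB prev && pvIsOpA c) || pvAdj (some c) rest

theorem pvAdj_some (cs : List Char) : ∀ a : Char, pvAdj (some a) cs = pvLoop2A (a :: cs) := by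
  induction cs with
  | nil => intro a; rfl
  | cons b r ih =>
    intro a
    simp [pvAdj, pvLoop2A, pvPrevOpB, pvOp_AB, ih b]

theorem pvAdj_none (cs : List Char) : pvAdj none cs = pvLoop2A cs := by
  cases cs with
  | nil => rfl
  | cons c r => simp [pvAdj, pvAdj_some, pvPrevOpB]


-- with a negative balance A's first loop yields `none` (or `some k` with k ≠ 0 on []), so the A-side value is false
theorem pvNeg (cs : List Char) (bal : Int) (h : bal < 0) (X : Bool) :
    (match pvLoop1A cs bal with
      | none => false
      | some k => X && decide (k = 0)) = false := by
  cases cs with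
  | nil =>
    simp [pvLoop1A]
    omega
  | cons c r => simp [pvLoop1A, h]

-- main invariant: B's fused loop equals A's balance loop composed with the adjacency check
theorem pvInv (cs : List Char) : ∀ (bal : Int) (prev : Option Char), 0 ≤ bal →
    pvLoopB cs bal prev =
      (match pvLoop1A cs bal with
        | none => false
        | some k => !pvAdj prev cs && decide (k = 0)) := by
  induction cs with
  | nil =>
    intro bal prev _
    simp [pvLoopB, pvLoop1A, pvAdj]
  | cons c r ih =>
    intro bal prev hb
    have hnotneg : ¬ bal < 0 := by omega
    by_cases h1 : c = '('
    · subst h1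
      have hA : pvAdj prev ('(' :: r) = pvAdj (some '(') r := by
        have hop : pvIsOpA '(' = false := by decide
        cases prev <;> simp [pvAdj, hop]
      simp only [pvLoopB, pvLoop1A, if_neg hnotneg, hA]
      exact ih (bal + 1) (some '(') (by omega)
    · by_cases h2 : c = ')'
      · subst h2
        by_cases h3 : bal - 1 < 0
        · simp only [pvLoopB, pvLoop1A, if_neg h1, if_pos h3, if_neg hnotneg]
          exact (pvNeg r (bal - 1) h3 _).symm
        · have hA : pvAdj prev (')' :: r) = pvAdj (some ')') r := by
            have hop : pvIsOpA ')' = false := by decide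
            cases prev <;> simp [pvAdj, hop]
          simp only [pvLoopB, pvLoop1A, if_neg h1, if_neg h3, if_neg hnotneg, hA]
          exact ih (bal - 1) (some ')') (by omega)
      · simp only [pvLoopB, pvLoop1A, if_neg h1, if_neg h2, if_neg hnotneg]
        by_cases h4 : (pvIsOpB c && pvPrevOpB prev) = true
        · simp only [if_pos h4]
          have hadj : pvAdj prev (c :: r) = true := by
            have h4' : pvIsOpB c = true ∧ pvPrevOpB prev = true := by simpa using h4
            simp [pvAdj, show pvPrevOpB prev = true from h4'.2,
              pvOp_AB c ▸ h4'.1]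
          simp only [hadj, Bool.not_true, Bool.false_and]
          cases pvLoop1A r bal with
          | none => rfl
          | some k => rfl
        · simp only [if_neg h4]
          have hfst : (pvPrevOpB prev && pvIsOpA c) = false := by
            cases hAc : pvIsOpA c
            · simp
            · cases hpp : pvPrevOpB prev
              · simp
              · exact absurd (by rw [pvOp_AB c, hAc, hpp]; rfl) h4
          have hA : pvAdj prev (c :: r) = pvAdj (some c) r := by
            simp [pvAdj, hfst]
          simp only [hA]
          exact ih bal (some c) hb

-- ===== VERDICT (by name: the statement is the Claim_ definition above) =====
theorem syntax_check_spec : Claim_equal_syntax_check := by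
  intro s _ hpre
  unfold Spec_syntax_check syntax_check syntax_check_alt
  have hcs : s.toList ≠ [] := by
    simpa using hpre
  obtain ⟨c0, cs', hcons⟩ := List.exists_cons_of_ne_nil hcs
  have h0 : PySem.Str.pyGet? s 0 = some c0 := by
    simp [PySem.Str.pyGet?, hcons]
  have hlast := List.getLast?_eq_some_getLast (l := s.toList) hcs
  have hl : PySem.Str.pyGet? s (-1) = some (s.toList.getLast hcs) := by
    simp [PySem.Str.pyGet?, PySem.List.pyGet?_neg_one, hlast]
  rw [h0, hl]
  rw [pvInv s.toList 0 none (by omega), pvAdj_none]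
  cases hres : pvLoop1A s.toList 0 with
  | none => simp [hres]
  | some k =>
    by_cases hadj : pvLoop2A s.toList = true
    · simp [hres, hadj]
    · by_cases hop : (pvIsOpA c0 || pvIsOpA (s.toList.getLast hcs)) = true
      · have hop' : (pvIsOpB c0 || pvIsOpB (s.toList.getLast hcs)) = true := by
          rw [pvOp_AB, pvOp_AB]; exact hop
        simp [hres, hop, hop', eq_false_of_ne_true hadj]
      · have hop' : (pvIsOpA c0 || pvIsOpA (s.toList.getLast hcs)) = false :=
          eq_false_of_ne_true hop
        obtain ⟨hx, hy⟩ := Bool.or_eq_false_iff.mp hop'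
        simp [hres, eq_false_of_ne_true hadj, hx, hy, pvOp_AB]
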